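-- pv_equiv track=rewrite | github.com/omaryasser/AskPalestine | enhanced_standardize_markdown.py | standardize_markdown_format
-- ===== SOURCE A (Python) =====
-- def standardize_markdown_format(content):
--     """Standardize markdown file formatting"""
--
--     # Split into lines
--     lines = content.split('\n')
--
--     # Remove leading empty lines
--     while lines and lines[0].strip() == '':
--         lines.pop(0)
--
--     # Remove trailing empty lines
--     while lines and lines[-1].strip() == '':
--         lines.pop()
--
--     if not lines:
--         return ""
--
--     # Find the first line (usually the introduction)
--     # and separate it from the quote content
--     result_lines = []
--
--     # Process line by line
--     i = 0
--     while i < len(lines):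
--         line = lines[i]
--
--         # Add the current line
--         result_lines.append(line)
--
--         # Look ahead for multiple empty lines and replace with single empty line
--         empty_count = 0
--         j = i + 1
--         while j < len(lines) and lines[j].strip() == '':
--             empty_count += 1
--             j += 1
--
--         # If we found multiple empty lines, add only one
--         if empty_count > 1:
--             result_lines.append('')
--             i = j
--         elif empty_count == 1:
--             result_lines.append('')
--             i = j
--         else:
--             i += 1
--
--     # Now process the content to add quote formatting
--     # Look for pattern: introduction line, empty line, then content
--     final_lines = []
--
--     for i, line in enumerate(result_lines):
--         if i == 0:
--             # First line is always kept as is (introduction)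
--             final_lines.append(line)
--         elif line.strip() == '':
--             # Empty lines are kept
--             final_lines.append(line)
--         else:
--             # For non-empty lines after the first line
--             # Check if it's already a quote (starts with >)
--             if line.strip().startswith('>'):
--                 final_lines.append(line)
--             else:
--                 # Check if this is likely a quote (not a heading, link, or source)
--                 if not (line.startswith('#') or
--                        line.startswith('[') or
--                        line.startswith('Source') or
--                        line.startswith('@') or
--                        line.startswith('**Source') or
--                        line.strip().startswith('*')):
--                     # Add quote formatting
--                     final_lines.append(f'> {line}')
--                 else:
--                     final_lines.append(line)
--
--     # Join back
--     result = '\n'.join(final_lines)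
--
--     # Ensure file ends with exactly one newline if it has content
--     if result.strip():
--         result = result.rstrip() + '\n'
--
--     return result
-- ===== SOURCE B (Python) =====
-- def standardize_markdown_format(content):
--     """Standardize markdown file formatting (single-pass re-implementation)."""
--     lines = content.split('\n')
--     # trim blank lines from both ends (end first, then front)
--     while lines and not lines[-1].strip():
--         lines = lines[:-1]
--     while lines and not lines[0].strip():
--         lines = lines[1:]
--     if not lines:
--         return ""
--     out = []
--     prev_blank = False
--     for line in lines:
--         if not line.strip():
--             if not prev_blank:
--                 out.append('')
--             prev_blank = True
--         else:
--             if out and not (line.lstrip().startswith('>')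
--                             or line.startswith(('#', '[', 'Source', '@'))
--                             or line.lstrip().startswith('*')):
--                 out.append('> ' + line)
--             else:
--                 out.append(line)
--             prev_blank = False
--     return '\n'.join(out).rstrip() + '\n'
-- ===== Notes on version B (the rewrite author's own statement) =====
-- stated objective: simpler
-- what changed: B replaces A's three separate passes (pop-loops trimming, a lookahead-and-jump loop collapsing blank runs, then an enumerate loop adding quote prefixes) by one fold over the trimmed lines carrying a prev-blank flag that collapses blank runs and quotes non-first content lines in the same step, and drops A's always-true result.strip() guard.
import Mathlib
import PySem

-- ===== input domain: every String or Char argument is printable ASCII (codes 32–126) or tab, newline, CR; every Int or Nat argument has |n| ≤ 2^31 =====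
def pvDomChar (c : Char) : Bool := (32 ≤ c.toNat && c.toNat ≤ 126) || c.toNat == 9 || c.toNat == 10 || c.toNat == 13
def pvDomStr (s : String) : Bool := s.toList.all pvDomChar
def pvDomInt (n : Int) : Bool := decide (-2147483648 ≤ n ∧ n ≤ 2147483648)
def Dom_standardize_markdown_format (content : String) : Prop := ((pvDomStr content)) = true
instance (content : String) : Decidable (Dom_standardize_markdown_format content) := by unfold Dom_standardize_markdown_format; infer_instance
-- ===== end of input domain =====

-- B merges A's collapse-blank-lines pass and quote-prefixing pass into one foldl with a
-- prev-blank flag (objective: simpler decomposition; same return value for every input).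

-- ===== PORT A =====

-- 'line.strip() == ""'
def pvBlank (l : List Char) : Bool := decide (PySem.Chars.strip l = [])

-- 'while lines and lines[0].strip() == "": lines.pop(0)'
def pvDropLeadA : List (List Char) → List (List Char)
  | [] => []
  | l :: rest => if pvBlank l then pvDropLeadA rest else l :: rest

-- 'while lines and lines[-1].strip() == "": lines.pop()'  (pop from the end = the same
-- loop on the reversed list; exact)
def pvDropTrailA (ls : List (List Char)) : List (List Char) :=
  (pvDropLeadA ls.reverse).reverse

-- the first while-loop: append current line, look ahead over blank lines, emit one '' for
-- a nonempty blank run and jump past it ('i = j'), else 'i += 1'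
def pvCollapseA : List (List Char) → List (List Char)
  | [] => []
  | l :: rest =>
    let empty_count := (rest.takeWhile pvBlank).length
    if 1 < empty_count then l :: [] :: pvCollapseA (rest.dropWhile pvBlank)
    else if empty_count = 1 then l :: [] :: pvCollapseA (rest.dropWhile pvBlank)
    else l :: pvCollapseA rest
termination_by ls => ls.length
decreasing_by
  · have := (List.dropWhile_sublist (l := rest) (p := pvBlank)).length_le; simp; omega
  · have := (List.dropWhile_sublist (l := rest) (p := pvBlank)).length_le; simp; omega
  · simp

-- body of the second loop for a non-blank line with i > 0
def pvStepA (line : List Char) : List Char :=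
  if PySem.Chars.startswith (PySem.Chars.strip line) ['>'] then line
  else if !(PySem.Chars.startswith line ['#'] ||
            PySem.Chars.startswith line ['['] ||
            PySem.Chars.startswith line ['S','o','u','r','c','e'] ||
            PySem.Chars.startswith line ['@'] ||
            PySem.Chars.startswith line ['*','*','S','o','u','r','c','e'] ||
            PySem.Chars.startswith (PySem.Chars.strip line) ['*']) then
    ['>', ' '] ++ line
  else line

-- second loop, one element: blank lines kept, otherwise pvStepA (i > 0 only)
def pvStepA' (line : List Char) : List Char :=
  if pvBlank line then line else pvStepA line

def standardize_markdown_format (content : String) : String :=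
  let lines := PySem.Chars.splitOn content.toList ['\n']
  let lines := pvDropLeadA lines
  let lines := pvDropTrailA lines
  if lines = [] then ""
  else
    let result_lines := pvCollapseA lines
    -- 'for i, line in enumerate(result_lines)': i == 0 kept as is, later lines via pvStepA'
    let final_lines :=
      match result_lines with
      | [] => []
      | first :: rest => first :: rest.map pvStepA'
    let result := PySem.Chars.join ['\n'] final_lines
    if PySem.Chars.strip result ≠ [] then String.mk (PySem.Chars.rstrip result ++ ['\n'])
    else String.mk result

-- ===== PORT B =====

-- 'not line.strip()'
def pvBlankB (l : List Char) : Bool := decide (PySem.Chars.strip l = [])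

-- 'line.lstrip().startswith(">") or line.startswith(("#","[","Source","@")) or line.lstrip().startswith("*")'
def pvGuardB (line : List Char) : Bool :=
  PySem.Chars.startswith (PySem.Chars.lstrip line) ['>'] ||
  PySem.Chars.startswith line ['#'] ||
  PySem.Chars.startswith line ['['] ||
  PySem.Chars.startswith line ['S','o','u','r','c','e'] ||
  PySem.Chars.startswith line ['@'] ||
  PySem.Chars.startswith (PySem.Chars.lstrip line) ['*']

-- the single for-loop body: state = (out, prev_blank)
def pvLoopB (s : List (List Char) × Bool) (line : List Char) : List (List Char) × Bool :=
  if pvBlankB line then (if s.2 then s else (s.1 ++ [([] : List Char)], true))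
  else (s.1 ++ [if !s.1.isEmpty && !pvGuardB line then ['>', ' '] ++ line else line], false)

def standardize_markdown_format_alt (content : String) : String :=
  let lines := PySem.Chars.splitOn content.toList ['\n']
  -- 'while lines and not lines[-1].strip(): lines = lines[:-1]'
  let lines := lines.rdropWhile pvBlankB
  -- 'while lines and not lines[0].strip(): lines = lines[1:]'
  let lines := lines.dropWhile pvBlankB
  if lines = [] then ""
  else
    let st := lines.foldl pvLoopB ([], false)
    String.mk (PySem.Chars.rstrip (PySem.Chars.join ['\n'] st.1) ++ ['\n'])

-- ===== PRECONDITION & SPEC =====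
def Spec_standardize_markdown_format (content : String) (out : String) : Prop := out = standardize_markdown_format_alt content
instance (content : String) (out : String) : Decidable (Spec_standardize_markdown_format content out) := by unfold Spec_standardize_markdown_format; infer_instance

-- ===== CLAIM (what is proved, stated in full; the proofs are below) =====
def Claim_equal_standardize_markdown_format : Prop := ∀ (content : String), Dom_standardize_markdown_format content → Spec_standardize_markdown_format content (standardize_markdown_format content)

-- ===== LEMMAS AND PROOFS =====

-- proof-side spec of B's loop tail after the first content line: prev = prev_blank
def pvG : Bool → List (List Char) → List (List Char)
  | _, [] => []
  | prev, l :: rest =>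
    if pvBlank l then (if prev then pvG true rest else [] :: pvG true rest)
    else (if pvGuardB l then l else ['>', ' '] ++ l) :: pvG false rest

theorem pvBlankB_eq : pvBlankB = pvBlank := rfl

theorem pvDropLeadA_eq (ls : List (List Char)) :
    pvDropLeadA ls = ls.dropWhile pvBlank := by
  induction ls with
  | nil => rfl
  | cons l rest ih =>
    by_cases h : pvBlank l = true <;> simp [pvDropLeadA, h, ih]

theorem pvRdropWhile_cons {α : Type} (p : α → Bool) (a : α) (t : List α)
    (h : ¬ ∀ x ∈ t, p x = true) :
    (a :: t).rdropWhile p = a :: t.rdropWhile p := by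
  have hne : t.reverse.dropWhile p ≠ [] := by
    simp only [ne_eq, List.dropWhile_eq_nil_iff, List.mem_reverse]
    intro hx; exact h hx
  simp [List.rdropWhile, List.dropWhile_append, hne, List.isEmpty_iff]

theorem pvDrop_comm {α : Type} (p : α → Bool) (l : List α) :
    (l.dropWhile p).rdropWhile p = (l.rdropWhile p).dropWhile p := by
  induction l with
  | nil => rfl
  | cons a t ih =>
    by_cases hpa : p a = true
    · by_cases ht' : ∀ x ∈ t, p x = true
      · have hall : ∀ x ∈ a :: t, p x = true := by
          intro x hx; rcases List.mem_cons.mp hx with h|h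
          · exact h ▸ hpa
          · exact ht' x h
        rw [List.rdropWhile_eq_nil_iff.mpr hall, List.dropWhile_eq_nil_iff.mpr hall]
        rfl
      · rw [pvRdropWhile_cons p a t ht', List.dropWhile_cons_of_pos hpa,
            List.dropWhile_cons_of_pos hpa, ih]
    · simp only [Bool.not_eq_true] at hpa
      have h1 : (a :: t).dropWhile p = a :: t := List.dropWhile_cons_of_neg (by simp [hpa])
      by_cases ht' : ∀ x ∈ t, p x = true
      · have h2 : (a :: t).rdropWhile p = [a] := by
          have hz : t.reverse.dropWhile p = [] := by
            rw [List.dropWhile_eq_nil_iff]; intro x hx; exact ht' x (List.mem_reverse.mp hx)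
          simp [List.rdropWhile, List.dropWhile_append, hz, hpa]
        rw [h1, h2]
        simp [List.dropWhile_cons, hpa]
      · rw [h1, pvRdropWhile_cons p a t ht',
            List.dropWhile_cons_of_neg (show ¬ p a = true by simp [hpa])]

theorem pvStrip_nil_iff (l : List Char) :
    PySem.Chars.strip l = [] ↔ ∀ c ∈ l, PySem.Chars.isspace c = true := by
  simp only [PySem.Chars.strip, PySem.Chars.rstrip, PySem.Chars.lstrip,
    List.reverse_eq_nil_iff, List.dropWhile_eq_nil_iff, List.mem_reverse]
  constructor
  · intro h c hc
    have hm : c ∈ List.takeWhile PySem.Chars.isspace l ++ List.dropWhile PySem.Chars.isspace l := by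
      rw [List.takeWhile_append_dropWhile]; exact hc
    rcases List.mem_append.mp hm with h1 | h1
    · exact List.mem_takeWhile_imp h1
    · exact h c h1
  · intro h c hc
    exact h c ((List.dropWhile_sublist (p := PySem.Chars.isspace)).subset hc)

theorem pvStripPrefix (l : List Char) :
    PySem.Chars.strip l <+: PySem.Chars.lstrip l := by
  obtain ⟨r, hr⟩ : (PySem.Chars.lstrip l).reverse.dropWhile PySem.Chars.isspace <:+ (PySem.Chars.lstrip l).reverse :=
    List.dropWhile_suffix _
  refine ⟨r.reverse, ?_⟩
  have h2 := congrArg List.reverse hr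
  simpa [PySem.Chars.strip, PySem.Chars.rstrip] using h2

theorem pvStartswith_strip (l : List Char) (h : pvBlank l = false) (c : Char) :
    PySem.Chars.startswith (PySem.Chars.strip l) [c] =
    PySem.Chars.startswith (PySem.Chars.lstrip l) [c] := by
  have hne : PySem.Chars.strip l ≠ [] := by
    simpa [pvBlank] using h
  obtain ⟨c0, s', hs⟩ : ∃ c0 s', PySem.Chars.strip l = c0 :: s' := by
    cases hx : PySem.Chars.strip l with
    | nil => exact absurd hx hne
    | cons a b => exact ⟨a, b, rfl⟩
  obtain ⟨r, hr⟩ := pvStripPrefix l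
  rw [hs] at hr
  rw [hs, ← hr]
  simp [PySem.Chars.startswith, List.isPrefixOf]

theorem pvStarStar (l : List Char)
    (h : PySem.Chars.startswith l ['*','*','S','o','u','r','c','e'] = true) :
    PySem.Chars.startswith (PySem.Chars.lstrip l) ['*'] = true := by
  rw [PySem.Chars.startswith_iff] at h ⊢
  obtain ⟨r, hr⟩ := h
  subst hr
  simp [PySem.Chars.lstrip, show PySem.Chars.isspace '*' = false by decide]

theorem pvStep_eq (l : List Char) (h : pvBlank l = false) :
    pvStepA l = if pvGuardB l then l else ['>', ' '] ++ l := by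
  unfold pvStepA pvGuardB
  rw [pvStartswith_strip l h '>', pvStartswith_strip l h '*']
  cases hss : PySem.Chars.startswith l ['*','*','S','o','u','r','c','e']
  · cases PySem.Chars.startswith (PySem.Chars.lstrip l) ['>'] <;>
    cases PySem.Chars.startswith l ['#'] <;>
    cases PySem.Chars.startswith l ['['] <;>
    cases PySem.Chars.startswith l ['S','o','u','r','c','e'] <;>
    cases PySem.Chars.startswith l ['@'] <;>
    cases PySem.Chars.startswith (PySem.Chars.lstrip l) ['*'] <;> simp
  · rw [pvStarStar l hss]
    cases PySem.Chars.startswith (PySem.Chars.lstrip l) ['>'] <;> simp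

theorem pvFoldB_acc (t : List (List Char)) :
    ∀ (acc : List (List Char)) (prev : Bool), acc ≠ [] →
    (t.foldl pvLoopB (acc, prev)).1 = acc ++ pvG prev t := by
  induction t with
  | nil => intro acc prev _; simp [pvG]
  | cons l rest ih =>
    intro acc prev hacc
    by_cases hb : pvBlank l = true
    · by_cases hp : prev = true
      · simp [pvLoopB, pvBlankB_eq, hb, hp, pvG, ih acc true hacc]
      · simp only [Bool.not_eq_true] at hp
        simp [pvLoopB, pvBlankB_eq, hb, hp, pvG, ih (acc ++ [[]]) true (by simp)]
    · simp only [Bool.not_eq_true] at hb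
      have hne : acc.isEmpty = false := by simp [hacc]
      simp [pvLoopB, pvBlankB_eq, hb, hne, pvG, ih (acc ++ [_]) false (by simp)]
      cases hg : pvGuardB l <;> simp [hg]

theorem pvG_true_dropWhile (t : List (List Char)) :
    pvG true (t.dropWhile pvBlank) = pvG true t := by
  induction t with
  | nil => rfl
  | cons l rest ih =>
    by_cases h : pvBlank l = true <;> simp [List.dropWhile_cons, h, pvG, ih]

theorem pvG_false_head (t : List (List Char)) (h : ∀ x ∈ t.head?, pvBlank x = false) :
    pvG false t = pvG true t := by
  cases t with
  | nil => rfl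
  | cons l rest => simp at h; simp [pvG, h]

theorem pvHead_dropWhile {α : Type} (p : α → Bool) (L : List α) :
    ∀ x ∈ (List.dropWhile p L).head?, p x = false := by
  induction L with
  | nil => simp
  | cons a t ih =>
    by_cases h : p a = true
    · simpa [h] using ih
    · simp only [Bool.not_eq_true] at h
      simp [List.dropWhile_cons, h]

theorem pvTakeWhile_pos {α : Type} (p : α → Bool) (t : List α) (k : Nat)
    (h : (t.takeWhile p).length = k + 1) :
    ∃ b t2, t = b :: t2 ∧ p b = true := by
  cases t with
  | nil => simp at h
  | cons b t2 =>
    by_cases hb : p b = true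
    · exact ⟨b, t2, rfl, hb⟩
    · rw [List.takeWhile_cons_of_neg (by simp [hb])] at h; simp at h

theorem pvCollapse_map (n : Nat) : ∀ (t : List (List Char)), t.length ≤ n →
    (∀ x ∈ t.head?, pvBlank x = false) →
    (pvCollapseA t).map pvStepA' = pvG true t := by
  induction n with
  | zero =>
    intro t ht _
    have : t = [] := List.length_eq_zero_iff.mp (Nat.le_zero.mp ht)
    subst this
    rw [pvCollapseA]; rfl
  | succ n ih =>
    intro t ht hh
    cases t with
    | nil => rw [pvCollapseA]; rfl
    | cons l rest =>
      simp only [List.head?_cons, Option.mem_some_iff] at hh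
      have hl : pvBlank l = false := hh l rfl
      cases hec : (rest.takeWhile pvBlank).length with
      | zero =>
        have hrest : ∀ x ∈ rest.head?, pvBlank x = false := by
          cases rest with
          | nil => simp
          | cons r r2 =>
            intro x hx
            simp only [List.head?_cons, Option.mem_some_iff] at hx
            subst hx
            by_cases hr : pvBlank r = true
            · rw [List.takeWhile_cons_of_pos hr] at hec; simp at hec
            · simpa using hr
        rw [pvCollapseA]
        simp only [hec]
        rw [if_neg (show ¬ (1:ℕ) < 0 by omega), if_neg (show ¬ (0:ℕ) = 1 by omega)]
        rw [List.map_cons, ih rest (by simpa using Nat.lt_succ_iff.mp (by simpa using ht)) hrest]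
        simp only [pvG, hl, if_neg (by simp [hl] : ¬ pvBlank l = true)]
        rw [pvStepA', if_neg (by simp [hl]), pvStep_eq l hl,
            pvG_false_head rest hrest]
        simp
      | succ k =>
        obtain ⟨b, rest2, hb, hbb⟩ := pvTakeWhile_pos pvBlank rest k hec
        have hdw : rest.dropWhile pvBlank = rest2.dropWhile pvBlank := by
          rw [hb, List.dropWhile_cons_of_pos hbb]
        have hlen : (rest.dropWhile pvBlank).length ≤ n := by
          have h1 := (List.dropWhile_sublist (l := rest) (p := pvBlank)).length_le
          have h2 : rest.length + 1 ≤ n + 1 := by simpa using ht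
          omega
        have hhead := pvHead_dropWhile pvBlank rest
        rw [pvCollapseA]
        simp only [hec]
        have hunf : (if 1 < k + 1 then l :: [] :: pvCollapseA (rest.dropWhile pvBlank)
            else if k + 1 = 1 then l :: [] :: pvCollapseA (rest.dropWhile pvBlank)
            else l :: pvCollapseA rest) = l :: [] :: pvCollapseA (rest.dropWhile pvBlank) := by
          by_cases hk : 1 < k + 1
          · rw [if_pos hk]
          · rw [if_neg hk, if_pos (by omega)]
        rw [hunf, List.map_cons, List.map_cons,
            ih (rest.dropWhile pvBlank) hlen hhead]
        have hstep0 : pvStepA' [] = [] := by decide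
        rw [hstep0, pvStepA', if_neg (by simp [hl]), pvStep_eq l hl]
        simp only [pvG, if_neg (by simp [hl] : ¬ pvBlank l = true), hb,
          if_pos hbb, Bool.false_eq_true, if_false]
        rw [← pvG_true_dropWhile rest2, ← hdw]
        simp [hb]

theorem pvCollapse_cons (t : List (List Char)) (h : List Char) :
    ∃ X, pvCollapseA (h :: t) = h :: X ∧ X.map pvStepA' = pvG false t := by
  cases hec : (t.takeWhile pvBlank).length with
  | zero =>
    refine ⟨pvCollapseA t, ?_, ?_⟩
    · rw [pvCollapseA]
      simp [hec]
    · have hhead : ∀ x ∈ t.head?, pvBlank x = false := by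
        cases t with
        | nil => simp
        | cons r r2 =>
          intro x hx
          simp only [List.head?_cons, Option.mem_some_iff] at hx
          subst hx
          by_cases hr : pvBlank r = true
          · rw [List.takeWhile_cons_of_pos hr] at hec; simp at hec
          · simpa using hr
      rw [pvCollapse_map t.length t le_rfl hhead, pvG_false_head t hhead]
  | succ k =>
    obtain ⟨b, t2, hb, hbb⟩ := pvTakeWhile_pos pvBlank t k hec
    refine ⟨[] :: pvCollapseA (t.dropWhile pvBlank), ?_, ?_⟩
    · rw [pvCollapseA]
      simp only [hec]
      by_cases hk : 1 < k + 1
      · rw [if_pos hk]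
      · rw [if_neg hk, if_pos (by omega)]
    · have hdw : t.dropWhile pvBlank = t2.dropWhile pvBlank := by
        rw [hb, List.dropWhile_cons_of_pos hbb]
      rw [List.map_cons, show pvStepA' [] = [] from by decide,
          pvCollapse_map (t.dropWhile pvBlank).length _ le_rfl (pvHead_dropWhile pvBlank t)]
      simp only [pvG, hb, if_pos hbb]
      rw [← pvG_true_dropWhile t2, ← hdw]
      simp [hb]

theorem pvJoin_nonblank (h : List Char) (X : List (List Char)) (hh : pvBlank h = false) :
    PySem.Chars.strip (PySem.Chars.join ['\n'] (h :: X)) ≠ [] := by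
  intro habs
  have hall := (pvStrip_nil_iff _).mp habs
  have hne : PySem.Chars.strip h ≠ [] := by simpa [pvBlank] using hh
  obtain ⟨c, hc, hcf⟩ : ∃ c ∈ h, PySem.Chars.isspace c = false := by
    by_contra hno
    simp only [not_exists, not_and, Bool.not_eq_false] at hno
    exact hne ((pvStrip_nil_iff h).mpr hno)
  have hmem : c ∈ PySem.Chars.join ['\n'] (h :: X) := by
    cases X with
    | nil =>
      simpa [PySem.Chars.join, List.intercalate, List.intersperse] using hc
    | cons b L =>
      have : PySem.Chars.join ['\n'] (h :: b :: L) =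
          h ++ ['\n'] ++ PySem.Chars.join ['\n'] (b :: L) := by
        simp [PySem.Chars.join, List.intercalate, List.intersperse]
      rw [this]
      exact List.mem_append_left _ (List.mem_append_left _ hc)
  rw [hall c hmem] at hcf
  simp at hcf

-- ===== VERDICT (by name: the statement is the Claim_ definition above) =====
theorem standardize_markdown_format_spec : Claim_equal_standardize_markdown_format := by
  intro content _
  unfold Spec_standardize_markdown_format standardize_markdown_format standardize_markdown_format_alt
  simp only [pvBlankB_eq]
  have htrim : pvDropTrailA (pvDropLeadA (PySem.Chars.splitOn content.toList ['\n'])) =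
      ((PySem.Chars.splitOn content.toList ['\n']).rdropWhile pvBlank).dropWhile pvBlank := by
    unfold pvDropTrailA
    rw [pvDropLeadA_eq, pvDropLeadA_eq]
    exact pvDrop_comm pvBlank _
  rw [htrim]
  cases hTe : ((PySem.Chars.splitOn content.toList ['\n']).rdropWhile pvBlank).dropWhile pvBlank with
  | nil => simp
  | cons h t =>
    have hh : pvBlank h = false := by
      have hhd := pvHead_dropWhile pvBlank ((PySem.Chars.splitOn content.toList ['\n']).rdropWhile pvBlank)
      rw [hTe] at hhd
      exact hhd h (by simp)
    obtain ⟨X, hX1, hX2⟩ := pvCollapse_cons t h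
    have hfold : ((h :: t).foldl pvLoopB ([], false)).1 = h :: pvG false t := by
      rw [List.foldl_cons]
      have hstep : pvLoopB ([], false) h = ([h], false) := by
        simp [pvLoopB, pvBlankB_eq, hh]
      rw [hstep, pvFoldB_acc t [h] false (by simp)]
      rfl
    rw [if_neg (show ¬ (h :: t = []) from by simp),
        if_neg (show ¬ (h :: t = []) from by simp), hX1]
    simp only []
    rw [hfold, ← hX2,
        if_pos (pvJoin_nonblank h (X.map pvStepA') hh)]
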